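-- pv_equiv track=rewrite | github.com/sevara1212/groupify | backend/routers/allocation.py | _availability_summary
-- ===== SOURCE A (Python) =====
-- from collections import defaultdict
--
-- def _availability_summary(slots: list[str]) -> str:
--     if not slots:
--         return "Availability not provided"
--
--     day_order = ["mon", "tue", "wed", "thu", "fri", "sat", "sun"]
--     period_order = ["morning", "afternoon", "evening"]
--
--     by_period: dict[str, list[str]] = defaultdict(list)
--     for slot in slots:
--         parts = slot.rsplit("_", 1)
--         if len(parts) == 2:
--             day_part, period = parts
--             by_period[period].append(day_part)
--
--     summaries = []
--     for period in period_order: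
--         days = by_period.get(period, [])
--         if not days:
--             continue
--         days_sorted = sorted(days, key=lambda d: day_order.index(d) if d in day_order else 99)
--         day_labels = [d.capitalize() for d in days_sorted]
--         if len(day_labels) >= 5:
--             summaries.append(f"Most {period}s")
--         elif len(day_labels) >= 2:
--             summaries.append(f"{day_labels[0]}–{day_labels[-1]} {period}s")
--         else:
--             summaries.append(f"{day_labels[0]} {period}")
--
--     return "Available " + ", ".join(summaries) if summaries else "Flexible availability"
-- ===== SOURCE B (Python) =====
-- def _availability_summary(slots: list[str]) -> str:
--     if not slots:
--         return "Availability not provided"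
--
--     day_order = ["mon", "tue", "wed", "thu", "fri", "sat", "sun"]
--
--     def day_key(d):
--         return day_order.index(d) if d in day_order else 99
--
--     def days_for(period):
--         days = []
--         for slot in slots:
--             parts = slot.rsplit("_", 1)
--             if len(parts) == 2 and parts[1] == period:
--                 days.append(parts[0])
--         return days
--
--     def label(period, days):
--         labels = [d.capitalize() for d in sorted(days, key=day_key)]
--         if len(labels) >= 5:
--             return f"Most {period}s"
--         if len(labels) >= 2:
--             return f"{labels[0]}\u2013{labels[-1]} {period}s"
--         return f"{labels[0]} {period}"
--
--     summaries = [label(p, d) for p in ("morning", "afternoon", "evening") if (d := days_for(p))]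
--     if not summaries:
--         return "Flexible availability"
--     return "Available " + ", ".join(summaries)
-- ===== Notes on version B (the rewrite author's own statement) =====
-- stated objective: alternative
-- what changed: B drops the defaultdict bucketing pass entirely: for each of the three fixed periods it collects that period's days by a direct filtering scan of the slots and formats them via small helper functions, instead of building a dict of buckets in one pass and then looping over the periods; same cost, plainer data flow (no dict), at the price of scanning slots once per period.
import Mathlib
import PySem

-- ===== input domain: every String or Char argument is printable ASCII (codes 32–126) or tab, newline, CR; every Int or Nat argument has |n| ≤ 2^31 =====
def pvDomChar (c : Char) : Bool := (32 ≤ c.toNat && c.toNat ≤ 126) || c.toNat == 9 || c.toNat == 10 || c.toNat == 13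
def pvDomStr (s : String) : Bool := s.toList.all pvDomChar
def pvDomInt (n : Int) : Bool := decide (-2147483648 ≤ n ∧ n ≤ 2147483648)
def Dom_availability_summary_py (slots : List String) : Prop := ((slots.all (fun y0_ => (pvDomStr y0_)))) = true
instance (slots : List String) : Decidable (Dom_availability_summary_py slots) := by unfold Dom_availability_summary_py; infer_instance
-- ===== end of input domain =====

-- B replaces A's defaultdict bucketing pass by a per-period filtering scan with helper functions (simpler decomposition, same cost).


-- ===== PORT A =====
-- hand port of s.rsplit("_", 1): splits at the LAST '_' (exact; two parts iff '_' occurs, else the 1-part case)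
def pvRsplitU1? (s : String) : Option (String × String) :=
  let cs := s.toList
  let i := PySem.Chars.rfind cs ['_']
  if i = -1 then none
  else some (String.ofList (cs.take i.toNat), String.ofList (cs.drop (i.toNat + 1)))

-- hand port of str.capitalize() (exact on ASCII: first char uppercased, rest lowercased)
def pvCapitalize (s : String) : String :=
  match s.toList with
  | [] => String.ofList []
  | c :: r => String.ofList (PySem.Chars.upperChar c :: r.map PySem.Chars.lowerChar)

def pvDayOrder : List String := ["mon", "tue", "wed", "thu", "fri", "sat", "sun"]

-- key=lambda d: day_order.index(d) if d in day_order else 99  (index? is some iff d in day_order)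
def pvDayKey (d : String) : Int :=
  match PySem.List.index? pvDayOrder d with
  | some i => (i : Int)
  | none => 99

def availability_summary_py (slots : List String) : String :=
  if slots = [] then "Availability not provided"
  else
    let byPeriod : PySem.Dict String (List String) :=
      slots.foldl (fun d slot =>
        match pvRsplitU1? slot with
        | some (dayPart, period) => d.modify period [] (· ++ [dayPart])
        | none => d) PySem.Dict.empty
    let summaries : List String :=
      ["morning", "afternoon", "evening"].foldl (fun acc period =>
        let days := byPeriod.getD period []
        if days = [] then acc
        else
          let daysSorted := PySem.List.sorted days pvDayKey
          let dayLabels := daysSorted.map pvCapitalize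
          if 5 ≤ dayLabels.length then acc ++ ["Most " ++ period ++ "s"]
          else if 2 ≤ dayLabels.length then
            acc ++ [PySem.List.pyGetD dayLabels 0 "" ++ "–" ++ PySem.List.pyGetD dayLabels (-1) "" ++ " " ++ period ++ "s"]
          else acc ++ [PySem.List.pyGetD dayLabels 0 "" ++ " " ++ period]) []
    if summaries = [] then "Flexible availability"
    else "Available " ++ PySem.Str.join ", " summaries

-- ===== PORT B =====
def pvDaysFor (slots : List String) (period : String) : List String :=
  slots.foldl (fun days slot =>
    match pvRsplitU1? slot with
    | some (dayPart, per) => if per = period then days ++ [dayPart] else days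
    | none => days) []

def pvLabel (period : String) (days : List String) : String :=
  let labels := (PySem.List.sorted days pvDayKey).map pvCapitalize
  if 5 ≤ labels.length then "Most " ++ period ++ "s"
  else if 2 ≤ labels.length then
    PySem.List.pyGetD labels 0 "" ++ "–" ++ PySem.List.pyGetD labels (-1) "" ++ " " ++ period ++ "s"
  else PySem.List.pyGetD labels 0 "" ++ " " ++ period

def availability_summary_py_alt (slots : List String) : String :=
  if slots = [] then "Availability not provided"
  else
    let summaries : List String :=
      ["morning", "afternoon", "evening"].filterMap (fun p =>
        let d := pvDaysFor slots p
        if d = [] then none else some (pvLabel p d))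
    if summaries = [] then "Flexible availability"
    else "Available " ++ PySem.Str.join ", " summaries

-- ===== PRECONDITION & SPEC =====
def Spec_availability_summary_py (slots : List String) (out : String) : Prop := out = availability_summary_py_alt slots
instance (slots : List String) (out : String) : Decidable (Spec_availability_summary_py slots out) := by unfold Spec_availability_summary_py; infer_instance

-- ===== CLAIM (what is proved, stated in full; the proofs are below) =====
def Claim_equal_availability_summary_py : Prop := ∀ (slots : List String), Dom_availability_summary_py slots → Spec_availability_summary_py slots (availability_summary_py slots)

-- ===== LEMMAS AND PROOFS =====

-- A's dict bucket for a period equals B's filtering scan (generalized over the starting dict / accumulator).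
theorem pv_dict_days (slots : List String) (d : PySem.Dict String (List String)) (p : String) :
    (slots.foldl (fun d slot =>
        match pvRsplitU1? slot with
        | some (dayPart, period) => d.modify period [] (· ++ [dayPart])
        | none => d) d).getD p []
    = slots.foldl (fun days slot =>
        match pvRsplitU1? slot with
        | some (dayPart, per) => if per = p then days ++ [dayPart] else days
        | none => days) (d.getD p []) := by
  induction slots generalizing d with
  | nil => rfl
  | cons s rest ih =>
    simp only [List.foldl_cons]
    cases h : pvRsplitU1? s with
    | none => simp [ih]
    | some pr =>
      obtain ⟨day, per⟩ := pr
      rw [ih]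
      rw [PySem.Dict.getD_modify]
      by_cases hp : per = p
      · subst hp; simp
      · simp [hp, Ne.symm hp]

set_option maxHeartbeats 1000000 in
theorem availability_summary_py_eq (slots : List String) :
    availability_summary_py slots = availability_summary_py_alt slots := by
  unfold availability_summary_py availability_summary_py_alt
  by_cases h : slots = []
  · simp [h]
  · simp only [h, if_false]
    have hm : (slots.foldl (fun d slot =>
        match pvRsplitU1? slot with
        | some (dayPart, period) => d.modify period [] (· ++ [dayPart])
        | none => d) PySem.Dict.empty).getD "morning" [] = pvDaysFor slots "morning" := by
      rw [pv_dict_days]; simp [PySem.Dict.getD_empty]; rfl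
    have ha : (slots.foldl (fun d slot =>
        match pvRsplitU1? slot with
        | some (dayPart, period) => d.modify period [] (· ++ [dayPart])
        | none => d) PySem.Dict.empty).getD "afternoon" [] = pvDaysFor slots "afternoon" := by
      rw [pv_dict_days]; simp [PySem.Dict.getD_empty]; rfl
    have he : (slots.foldl (fun d slot =>
        match pvRsplitU1? slot with
        | some (dayPart, period) => d.modify period [] (· ++ [dayPart])
        | none => d) PySem.Dict.empty).getD "evening" [] = pvDaysFor slots "evening" := by
      rw [pv_dict_days]; simp [PySem.Dict.getD_empty]; rfl
    simp only [List.foldl_cons, List.foldl_nil, List.filterMap_cons, List.filterMap_nil,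
      hm, ha, he, pvLabel]
    clear hm ha he
    by_cases h1 : pvDaysFor slots "morning" = [] <;>
    by_cases h2 : pvDaysFor slots "afternoon" = [] <;>
    by_cases h3 : pvDaysFor slots "evening" = [] <;>
    simp only [h1, h2, h3, if_true, if_false, List.nil_append] <;>
    split_ifs <;> simp_all

-- ===== VERDICT (by name: the statement is the Claim_ definition above) =====
theorem availability_summary_py_spec : Claim_equal_availability_summary_py := by
  intro slots _
  unfold Spec_availability_summary_py
  exact availability_summary_py_eq slots
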